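-- pv_equiv track=rewrite | github.com/edouardmulliez/adventofcode | 2017/d04/d04.py | is_psw_valid
-- ===== SOURCE A (Python) =====
-- def is_psw_valid(psw):
--     words = [word.replace('\n','') for word in psw.split(' ')]
--
--     count = dict()
--     for word in words:
--         if word in count.keys():
--             count[word] += 1
--         else:
--             count[word] = 1
--
--     if max(count.values()) <= 1:
--         return True
--     return False
-- ===== SOURCE B (Python) =====
-- def is_psw_valid(psw):
--     words = [word.replace('\n', '') for word in psw.split(' ')]
--     prev = None
--     first = True
--     for w in sorted(words):
--         if not first and w == prev:
--             return False
--         prev = w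
--         first = False
--     return True
-- ===== Notes on version B (the rewrite author's own statement) =====
-- stated objective: alternative
-- what changed: Replaces the frequency-dict-plus-max(counts) strategy with sorting the word list and scanning once for two equal adjacent words.
import Mathlib
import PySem

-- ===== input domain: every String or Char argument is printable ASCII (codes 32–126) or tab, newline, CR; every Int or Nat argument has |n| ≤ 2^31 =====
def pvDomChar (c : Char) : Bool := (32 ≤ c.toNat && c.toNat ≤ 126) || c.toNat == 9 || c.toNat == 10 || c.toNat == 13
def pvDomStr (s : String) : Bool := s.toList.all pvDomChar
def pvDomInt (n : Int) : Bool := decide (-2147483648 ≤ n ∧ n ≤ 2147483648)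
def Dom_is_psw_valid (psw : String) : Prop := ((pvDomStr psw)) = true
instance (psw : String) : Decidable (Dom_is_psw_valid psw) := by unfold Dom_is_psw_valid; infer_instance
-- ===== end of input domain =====

-- B replaces A's frequency-dict-and-max strategy by sort-then-scan for adjacent duplicates (alternative decomposition, same result).

-- ===== PORT A =====
def is_psw_valid (psw : String) : Bool :=
  -- psw.split(' '): sep ≠ "", so split? is always some (the .getD [] branch is unreachable)
  let words := ((PySem.Str.split? psw " ").getD []).map (fun w => PySem.Str.replace w "\n" "")
  let count := words.foldl
    (fun d w => if d.contains w then d.insert w (d.getD w 0 + 1) else d.insert w 1)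
    (PySem.Dict.empty : PySem.Dict String Int)
  -- max(count.values()): values is never empty (split(' ') yields at least one word), so the
  -- none branch is unreachable; Python would raise ValueError there.
  match PySem.List.max? count.values (fun v => v) with
  | some m => decide (m ≤ 1)
  | none => true

-- ===== PORT B =====
-- the prev/first loop of Source B: prev = none encodes first = True
def pvScanAdj : Option String → List String → Bool
  | _, [] => true
  | none, w :: rest => pvScanAdj (some w) rest
  | some p, w :: rest => if w = p then false else pvScanAdj (some w) rest

def is_psw_valid_alt (psw : String) : Bool :=
  let words := ((PySem.Str.split? psw " ").getD []).map (fun w => PySem.Str.replace w "\n" "")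
  pvScanAdj none (PySem.List.sorted words (fun w => w) false)

-- ===== PRECONDITION & SPEC =====
def Spec_is_psw_valid (psw : String) (out : Bool) : Prop := out = is_psw_valid_alt psw
instance (psw : String) (out : Bool) : Decidable (Spec_is_psw_valid psw out) := by unfold Spec_is_psw_valid; infer_instance

-- ===== CLAIM (what is proved, stated in full; the proofs are below) =====
def Claim_equal_is_psw_valid : Prop := ∀ (psw : String), Dom_is_psw_valid psw → Spec_is_psw_valid psw (is_psw_valid psw)

-- ===== LEMMAS AND PROOFS =====

-- A's counting loop is Counter(words)
theorem pvFold_eq_counter (ws : List String) :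
    ws.foldl (fun d w => if d.contains w then d.insert w (d.getD w 0 + 1) else d.insert w 1)
      (PySem.Dict.empty : PySem.Dict String Int) = PySem.Dict.counter ws := by
  rw [← PySem.Dict.foldl_insert_getD_add_one_eq_counter]
  congr 1
  funext d w
  by_cases h : d.contains w = true
  · simp [h]
  · simp only [h, if_false, Bool.false_eq_true]
    rw [PySem.Dict.getD_of_not_contains d 0 (by simpa using h)]
    norm_num

-- A's max-of-counts test decides Nodup
theorem pvA_true_iff (ws : List String) :
    ((match PySem.List.max? (PySem.Dict.counter ws).values (fun v => v) with
      | some m => decide (m ≤ 1)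
      | none => true) = true) ↔ ws.Nodup := by
  have hvals : (PySem.Dict.counter ws).values
      = (PySem.Set.ofList ws).map (fun k => ((List.count k ws : Int))) := by
    show ((PySem.Dict.counter ws).items.map (·.2))
        = (PySem.Set.ofList ws).map (fun k => ((List.count k ws : Int)))
    rw [PySem.Dict.items_counter]
    simp
  constructor
  · intro h
    rw [List.nodup_iff_count_le_one]
    intro a
    by_cases ha : a ∈ ws
    · have hmem : ((List.count a ws : Int)) ∈ (PySem.Dict.counter ws).values := by
        rw [hvals]
        exact List.mem_map_of_mem ((PySem.Set.mem_ofList ws a).2 ha)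
      cases hm : PySem.List.max? (PySem.Dict.counter ws).values (fun v => v) with
      | none =>
        rw [PySem.List.max?_eq_none_iff] at hm
        rw [hm] at hmem
        exact absurd hmem (List.not_mem_nil)
      | some m =>
        have hle := PySem.List.max?_isMax hm _ hmem
        rw [hm] at h
        have hm1 : m ≤ 1 := by simpa using h
        have hle' : ((List.count a ws : Int)) ≤ m := hle
        omega
    · simp [List.count_eq_zero_of_not_mem ha]
  · intro hnd
    rw [List.nodup_iff_count_le_one] at hnd
    cases hm : PySem.List.max? (PySem.Dict.counter ws).values (fun v => v) with
    | none => simp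
    | some m =>
      have hmem := PySem.List.max?_mem hm
      rw [hvals] at hmem
      obtain ⟨k, _, hk⟩ := List.mem_map.1 hmem
      have hc := hnd k
      simp only [← hk]
      simp
      omega

-- B's scan with prev = some w on a ≤-sorted tail bounded below by w
theorem pvScan_some_iff (l : List String) (h : l.Pairwise (· ≤ ·)) :
    ∀ w, (∀ x ∈ l, w ≤ x) → (pvScanAdj (some w) l = true ↔ w ∉ l ∧ l.Nodup) := by
  induction l with
  | nil => intro w _; simp [pvScanAdj]
  | cons b rest ih =>
    intro w hw
    have hpair := List.pairwise_cons.1 h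
    by_cases hb : b = w
    · subst hb
      simp [pvScanAdj]
    · rw [pvScanAdj, if_neg hb]
      rw [ih hpair.2 b hpair.1]
      constructor
      · rintro ⟨hbr, hnd⟩
        have hwb := hw b List.mem_cons_self
        refine ⟨?_, List.nodup_cons.2 ⟨hbr, hnd⟩⟩
        intro hmem
        rcases List.mem_cons.1 hmem with h1 | h1
        · exact hb h1.symm
        · exact hb (le_antisymm hwb (hpair.1 w h1)).symm
      · rintro ⟨_, hnd⟩
        exact ⟨(List.nodup_cons.1 hnd).1, (List.nodup_cons.1 hnd).2⟩

theorem pvScan_none_iff (l : List String) (h : l.Pairwise (· ≤ ·)) :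
    pvScanAdj none l = true ↔ l.Nodup := by
  cases l with
  | nil => simp [pvScanAdj]
  | cons b rest =>
    have hpair := List.pairwise_cons.1 h
    rw [pvScanAdj, pvScan_some_iff rest hpair.2 b hpair.1]
    exact (List.nodup_cons).symm

-- B decides Nodup of the word list
theorem pvB_true_iff (ws : List String) :
    (pvScanAdj none (PySem.List.sorted ws (fun w => w) false) = true) ↔ ws.Nodup := by
  rw [pvScan_none_iff _ (PySem.List.sorted_pairwise ws (fun w => w))]
  exact (PySem.List.sorted_perm ws (fun w => w) false).nodup_iff

-- the two bodies agree for ANY word list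
theorem pvMain (ws : List String) :
    (match PySem.List.max? (ws.foldl
        (fun d w => if d.contains w then d.insert w (d.getD w 0 + 1) else d.insert w 1)
        (PySem.Dict.empty : PySem.Dict String Int)).values (fun v => v) with
      | some m => decide (m ≤ 1)
      | none => true)
      = pvScanAdj none (PySem.List.sorted ws (fun w => w) false) := by
  rw [pvFold_eq_counter, Bool.eq_iff_iff, pvA_true_iff, pvB_true_iff]

-- ===== VERDICT (by name: the statement is the Claim_ definition above) =====
theorem is_psw_valid_spec : Claim_equal_is_psw_valid := by
  intro psw _
  show is_psw_valid psw = is_psw_valid_alt psw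
  simp only [is_psw_valid, is_psw_valid_alt]
  exact pvMain _
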